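-- pv_equiv track=rewrite | github.com/Suraj1199/GoogleCompetitions_Solutions | Kickstart/2022/A/2_Challenge_Nine.py | solve
-- ===== SOURCE A (Python) =====
-- def solve(n):
--     s = str(n)
--     if n % 9 == 0:
--         return s[0] + '0' + s[1:]
--     r = str(9 - (n % 9))
--     i = 0
--     while i < len(s):
--         if s[i] > r:
--             break
--         i += 1
--     return s[:i] + r + s[i:]
-- ===== SOURCE B (Python) =====
-- def solve(n):
--     s = str(n)
--     if n % 9 == 0:
--         return s[0] + '0' + s[1:]
--     r = str(9 - n % 9)
--     return min(s[:i] + r + s[i:] for i in range(len(s) + 1))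
-- ===== Notes on version B (the rewrite author's own statement) =====
-- stated objective: simpler
-- what changed: The greedy left-to-right scan for the insertion point is replaced by generate-and-minimize: build every string obtainable by inserting the needed digit at each position and return the lexicographic min (all candidates have equal length, so lexicographic min is the numeric min).
import Mathlib
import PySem

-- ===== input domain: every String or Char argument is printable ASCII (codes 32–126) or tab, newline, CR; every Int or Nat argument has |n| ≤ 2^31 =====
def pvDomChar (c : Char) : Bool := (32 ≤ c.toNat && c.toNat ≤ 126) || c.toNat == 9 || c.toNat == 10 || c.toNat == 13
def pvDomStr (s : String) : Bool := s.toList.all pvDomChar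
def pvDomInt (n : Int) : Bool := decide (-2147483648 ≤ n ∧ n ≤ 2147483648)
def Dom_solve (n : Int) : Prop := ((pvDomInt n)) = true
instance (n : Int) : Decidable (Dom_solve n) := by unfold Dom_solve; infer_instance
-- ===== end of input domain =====

-- B replaces A's greedy scan for the insertion point by generate-and-minimize over all insertion positions (simpler, not faster).


-- ===== PORT A =====
-- the while loop: i starts at 0 and advances until s[i] > r (string compare) or the end
def solveIdx (r : List Char) : List Char → Nat
  | [] => 0
  | c :: t => if r < [c] then 0 else solveIdx r t + 1

def solve (n : Int) : String :=
  -- s = str(n), handled as its list of code points throughout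
  if PySem.Int.mod n 9 == 0 then
    match (PySem.Int.toStr n).toList with
    | c :: t => String.ofList (c :: '0' :: t)    -- s[0] + '0' + s[1:]
    | [] => ""                                   -- unreachable: str(n) is never empty
  else
    -- r = str(9 - n % 9); i = the while loop's final index; then s[:i] + r + s[i:]
    -- (slices with 0 ≤ i ≤ len(s) are take/drop: exact)
    String.ofList ((PySem.Int.toStr n).toList.take
        (solveIdx (PySem.Int.toStr (9 - PySem.Int.mod n 9)).toList (PySem.Int.toStr n).toList)
      ++ (PySem.Int.toStr (9 - PySem.Int.mod n 9)).toList
      ++ (PySem.Int.toStr n).toList.drop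
        (solveIdx (PySem.Int.toStr (9 - PySem.Int.mod n 9)).toList (PySem.Int.toStr n).toList))

-- ===== PORT B =====
def solve_alt (n : Int) : String :=
  -- s = str(n), handled as its list of code points throughout
  if PySem.Int.mod n 9 == 0 then
    match (PySem.Int.toStr n).toList with
    | c :: t => String.ofList (c :: '0' :: t)    -- s[0] + '0' + s[1:]
    | [] => ""                                   -- unreachable: str(n) is never empty
  else
    -- r = str(9 - n % 9); min() over the candidates s[:i] + r + s[i:], i in range(len(s)+1)
    -- (slices with 0 ≤ i ≤ len(s) are take/drop: exact; min() of a nonempty list, so getD is unreachable)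
    String.ofList ((PySem.List.min?
        ((List.range ((PySem.Int.toStr n).toList.length + 1)).map (fun i =>
          (PySem.Int.toStr n).toList.take i
            ++ (PySem.Int.toStr (9 - PySem.Int.mod n 9)).toList
            ++ (PySem.Int.toStr n).toList.drop i))
        (fun x => x)).getD [])

-- ===== PRECONDITION & SPEC =====
def Spec_solve (n : Int) (out : String) : Prop := out = solve_alt n
instance (n : Int) (out : String) : Decidable (Spec_solve n out) := by unfold Spec_solve; infer_instance

-- ===== CLAIM (what is proved, stated in full; the proofs are below) =====
def Claim_equal_solve : Prop := ∀ (n : Int), Dom_solve n → Spec_solve n (solve n)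

-- ===== LEMMAS AND PROOFS =====

-- one-digit insertion done greedily (the value A's loop + slicing computes)
def grd (rc : Char) : List Char → List Char
  | [] => [rc]
  | c :: t => if rc < c then rc :: c :: t else c :: grd rc t

theorem cons_le_cons_iff' (c : Char) (a b : List Char) : (c :: a) ≤ (c :: b) ↔ a ≤ b := by
  rw [le_iff_lt_or_eq, le_iff_lt_or_eq]
  simp

theorem min_cons_cons (c : Char) (a b : List Char) : min (c :: a) (c :: b) = c :: min a b := by
  rcases le_total a b with h | h
  · rw [min_eq_left h, min_eq_left ((cons_le_cons_iff' c a b).mpr h)]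
  · rw [min_eq_right h, min_eq_right ((cons_le_cons_iff' c b a).mpr h)]

theorem foldl_min_comm (zs : List (List Char)) : ∀ (x y : List Char),
    List.foldl min (min x y) zs = min x (List.foldl min y zs) := by
  induction zs with
  | nil => intro x y; rfl
  | cons z zs ih =>
    intro x y
    simp only [List.foldl_cons, min_assoc]
    exact ih x (min y z)

theorem foldl_min_map_cons (c : Char) (ys : List (List Char)) : ∀ (y : List Char),
    List.foldl min (c :: y) (ys.map (c :: ·)) = c :: List.foldl min y ys := by
  induction ys with
  | nil => intro y; rfl
  | cons z zs ih =>
    intro y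
    simp only [List.map_cons, List.foldl_cons, min_cons_cons]
    exact ih (min y z)

-- A's loop index + slicing equals the greedy insertion
theorem grd_eq_idx (rc : Char) (s : List Char) :
    s.take (solveIdx [rc] s) ++ [rc] ++ s.drop (solveIdx [rc] s) = grd rc s := by
  induction s with
  | nil => rfl
  | cons c t ih =>
    by_cases h : rc < c
    · have h' : [rc] < [c] := by simp [List.cons_lt_cons_iff, h]
      simp [solveIdx, grd, h, h']
    · have h' : ¬ ([rc] < [c]) := by simp [List.cons_lt_cons_iff, h]
      simp [solveIdx, grd, h, h', ih]

-- B's candidate list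
def cnd (rc : Char) (s : List Char) : List (List Char) :=
  (List.range (s.length + 1)).map (fun i => s.take i ++ [rc] ++ s.drop i)

theorem cnd_expand (rc : Char) (t : List Char) :
    cnd rc t = (rc :: t) ::
      (List.range t.length).map (fun i => t.take (i + 1) ++ [rc] ++ t.drop (i + 1)) := by
  unfold cnd
  rw [List.range_succ_eq_map]
  simp [List.map_map, Function.comp_def]

theorem cnd_cons (rc c : Char) (t : List Char) :
    cnd rc (c :: t) = (rc :: c :: t) :: (cnd rc t).map (c :: ·) := by
  unfold cnd
  rw [List.length_cons, List.range_succ_eq_map]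
  simp [List.map_map, Function.comp_def]

-- min? on (x :: t) with the identity key is the running foldl min
-- (PySem.List.min?_id_cons states this, but with LinearOrder-bundled instances that are not
--  syntactically the ones elaborated for List Char here, so we derive the fact directly)
theorem min?_cons_eq (t : List (List Char)) : ∀ (x : List Char),
    PySem.List.min? (x :: t) (fun y => y) = some (List.foldl min x t) := by
  induction t with
  | nil => intro x; rfl
  | cons z zs ih =>
    intro x
    have key : PySem.List.min? (x :: z :: zs) (fun y => y)
        = PySem.List.min? (min x z :: zs) (fun y => y) := by
      rcases lt_or_ge z x with h | h
      · simp [PySem.List.min?, min_eq_right h.le, h]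
      · simp [PySem.List.min?, min_eq_left h, not_lt.mpr h]
    rw [key, ih (min x z), List.foldl_cons]

-- min() over all insertions is the greedy insertion
theorem min_cnd (rc : Char) (s : List Char) :
    PySem.List.min? (cnd rc s) (fun x => x) = some (grd rc s) := by
  induction s with
  | nil => rfl
  | cons c t ih =>
    obtain ⟨ys, hys⟩ : ∃ ys, cnd rc t = (rc :: t) :: ys := ⟨_, cnd_expand rc t⟩
    rw [hys, min?_cons_eq] at ih
    have hfold : List.foldl min (rc :: t) ys = grd rc t := by
      simpa using ih
    have hle : grd rc t ≤ rc :: t := by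
      rw [← hfold]; exact (PySem.List.foldl_min_le ys (rc :: t)).1
    rw [cnd_cons, hys, List.map_cons, min?_cons_eq, List.foldl_cons]
    have hshift : List.foldl min (min (rc :: c :: t) (c :: rc :: t)) (ys.map (c :: ·))
        = min (rc :: c :: t) (List.foldl min (c :: rc :: t) (ys.map (c :: ·))) :=
      foldl_min_comm _ _ _
    rw [hshift, foldl_min_map_cons, hfold]
    rcases lt_trichotomy rc c with h | h | h
    · have : (rc :: c :: t) ≤ (c :: grd rc t) :=
        le_of_lt (by simp [List.cons_lt_cons_iff, h])
      rw [min_eq_left this]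
      simp [grd, h]
    · subst h
      rw [min_cons_cons, min_eq_right hle]
      simp [grd]
    · have : (c :: grd rc t) ≤ (rc :: c :: t) :=
        le_of_lt (by simp [List.cons_lt_cons_iff, h])
      rw [min_eq_right this]
      simp [grd, lt_asymm h]

theorem toStr_single (v : Int) (h1 : 1 ≤ v) (h2 : v ≤ 8) :
    ∃ rc : Char, (PySem.Int.toStr v).toList = [rc] := by
  interval_cases v
  exacts [⟨'1', by decide⟩, ⟨'2', by decide⟩, ⟨'3', by decide⟩, ⟨'4', by decide⟩,
    ⟨'5', by decide⟩, ⟨'6', by decide⟩, ⟨'7', by decide⟩, ⟨'8', by decide⟩]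

-- ===== VERDICT (by name: the statement is the Claim_ definition above) =====
theorem solve_spec : Claim_equal_solve := by
  intro n _
  unfold Spec_solve solve solve_alt
  by_cases h : (PySem.Int.mod n 9 == 0) = true
  · rw [if_pos h, if_pos h]
  · rw [if_neg h, if_neg h]
    have hm : PySem.Int.mod n 9 = n % 9 := PySem.Int.mod_eq_emod_of_pos (by norm_num)
    have h0 : 0 ≤ n % 9 := Int.emod_nonneg n (by norm_num)
    have h9 : n % 9 < 9 := Int.emod_lt_of_pos n (by norm_num)
    have hne : PySem.Int.mod n 9 ≠ 0 := by simpa using h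
    obtain ⟨rc, hrc⟩ := toStr_single (9 - PySem.Int.mod n 9) (by omega) (by omega)
    rw [hrc]
    have hfold : (List.range ((PySem.Int.toStr n).toList.length + 1)).map
        (fun i => (PySem.Int.toStr n).toList.take i ++ [rc] ++ (PySem.Int.toStr n).toList.drop i)
        = cnd rc (PySem.Int.toStr n).toList := rfl
    rw [hfold, min_cnd, Option.getD_some, grd_eq_idx rc (PySem.Int.toStr n).toList]
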